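-- pv_equiv track=rewrite | github.com/AnnaBinoy09/Internship-Project | passshield/patterns.py | detect_sequential_alpha
-- ===== SOURCE A (Python) =====
-- def detect_sequential_alpha(password):
--     """Detect 3+ sequential alphabetical characters."""
--     lower = password.lower()
--     for i in range(len(lower) - 2):
--         a, b, c = lower[i], lower[i+1], lower[i+2]
--         if a.isalpha() and b.isalpha() and c.isalpha():
--             if ord(b) == ord(a) + 1 and ord(c) == ord(b) + 1:
--                 return True
--             if ord(b) == ord(a) - 1 and ord(c) == ord(b) - 1:
--                 return True
--     return False
-- ===== SOURCE B (Python) =====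
-- _FWD = "abcdefghijklmnopqrstuvwxyz"
-- _REV = "zyxwvutsrqponmlkjihgfedcba"
-- _PATTERNS = [s[i:i+3] for s in (_FWD, _REV) for i in range(24)]
--
--
-- def detect_sequential_alpha(password):
--     """Detect 3+ sequential alphabetical characters."""
--     lower = password.lower()
--     return any(p in lower for p in _PATTERNS)
-- ===== Notes on version B (the rewrite author's own statement) =====
-- stated objective: faster
-- what changed: Replaces the positional ord-arithmetic window scan with a precomputed table of the 48 three-letter sequential patterns (24 ascending, 24 descending) tested by substring membership against the lowercased password.
import Mathlib
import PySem

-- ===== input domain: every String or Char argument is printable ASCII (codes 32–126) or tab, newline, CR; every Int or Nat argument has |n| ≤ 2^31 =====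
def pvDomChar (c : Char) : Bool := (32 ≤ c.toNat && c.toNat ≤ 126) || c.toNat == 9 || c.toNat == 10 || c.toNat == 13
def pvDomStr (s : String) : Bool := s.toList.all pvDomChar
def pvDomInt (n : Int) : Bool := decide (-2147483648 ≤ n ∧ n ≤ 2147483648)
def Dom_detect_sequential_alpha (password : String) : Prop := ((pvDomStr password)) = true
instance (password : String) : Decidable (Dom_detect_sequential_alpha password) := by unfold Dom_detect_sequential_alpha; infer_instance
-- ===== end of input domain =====

-- B replaces A's positional ord-arithmetic window scan by a precomputed table of the 48
-- sequential triples and substring membership (measured faster in a timing run; same return value everywhere).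

-- ===== PORT A =====
-- A's window test at index i of the lowered string (the loop body).
def pvCheckA (lower : String) (i : Int) : Bool :=
  match PySem.Str.pyGet? lower i, PySem.Str.pyGet? lower (i+1), PySem.Str.pyGet? lower (i+2) with
  | some a, some b, some c =>
    if PySem.Chars.isalpha a && PySem.Chars.isalpha b && PySem.Chars.isalpha c then
      if b.toNat == a.toNat + 1 && c.toNat == b.toNat + 1 then true
      else if b.toNat + 1 == a.toNat && c.toNat + 1 == b.toNat then true
      else false
    else false
  | _, _, _ => false

def detect_sequential_alpha (password : String) : Bool :=
  let lower := PySem.Str.lower password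
  (PySem.List.pyRange 0 (PySem.Str.len lower - 2) 1).any (fun i => pvCheckA lower i)

-- ===== PORT B =====
def pvFwd : String := "abcdefghijklmnopqrstuvwxyz"
def pvRev : String := "zyxwvutsrqponmlkjihgfedcba"
def pvPatterns : List String :=
  [pvFwd, pvRev].flatMap (fun s =>
    (PySem.List.pyRange 0 24 1).map (fun i => PySem.Str.slice s (some i) (some (i+3))))

def detect_sequential_alpha_alt (password : String) : Bool :=
  let lower := PySem.Str.lower password
  pvPatterns.any (fun p => PySem.Str.isIn p lower)

-- ===== PRECONDITION & SPEC =====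
def Spec_detect_sequential_alpha (password : String) (out : Bool) : Prop := out = detect_sequential_alpha_alt password
instance (password : String) (out : Bool) : Decidable (Spec_detect_sequential_alpha password out) := by unfold Spec_detect_sequential_alpha; infer_instance

-- ===== CLAIM (what is proved, stated in full; the proofs are below) =====
def Claim_equal_detect_sequential_alpha : Prop := ∀ (password : String), Dom_detect_sequential_alpha password → Spec_detect_sequential_alpha password (detect_sequential_alpha password)

-- ===== LEMMAS AND PROOFS =====

-- A's triple condition, as a predicate on three chars.
def pvGood3 (a b c : Char) : Bool :=
  if PySem.Chars.isalpha a && PySem.Chars.isalpha b && PySem.Chars.isalpha c then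
    if b.toNat == a.toNat + 1 && c.toNat == b.toNat + 1 then true
    else if b.toNat + 1 == a.toNat && c.toNat + 1 == b.toNat then true
    else false
  else false

-- midpoint characterization: some window of three consecutive chars satisfies pvGood3
def pvMid (l : List Char) : Prop :=
  ∃ (k : Nat) (a b c : Char) (r : List Char), l.drop k = a :: b :: c :: r ∧ pvGood3 a b c = true

theorem pv_isupper_iff (c : Char) : PySem.Chars.isupper c = true ↔ 65 ≤ c.toNat ∧ c.toNat ≤ 90 := by
  simp only [PySem.Chars.isupper, Bool.and_eq_true, decide_eq_true_eq, Char.le_def,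
    UInt32.le_iff_toNat_le]
  constructor <;> intro h <;> exact ⟨h.1, h.2⟩

theorem pv_islower_iff (c : Char) : PySem.Chars.islower c = true ↔ 97 ≤ c.toNat ∧ c.toNat ≤ 122 := by
  simp only [PySem.Chars.islower, Bool.and_eq_true, decide_eq_true_eq, Char.le_def,
    UInt32.le_iff_toNat_le]
  constructor <;> intro h <;> exact ⟨h.1, h.2⟩

theorem pv_lowerChar_not_upper (x : Char) : PySem.Chars.isupper (PySem.Chars.lowerChar x) = false := by
  unfold PySem.Chars.lowerChar
  by_cases h : PySem.Chars.isupper x = true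
  · simp only [h, if_true]
    obtain ⟨h1, h2⟩ := (pv_isupper_iff x).mp h
    rw [← Bool.not_eq_true, pv_isupper_iff, Char.toNat_ofNat]
    have hv : (x.toNat + 32).isValidChar := Or.inl (by omega)
    simp [hv]; omega
  · simp only [h]
    simpa using h

theorem pv_mem_lower_not_upper (s : List Char) (c : Char) (h : c ∈ PySem.Chars.lower s) :
    PySem.Chars.isupper c = false := by
  unfold PySem.Chars.lower at h
  obtain ⟨x, -, rfl⟩ := List.mem_map.mp h
  exact pv_lowerChar_not_upper x

theorem pv_checkA_eq (s : String) (k : Nat) (h : k + 2 < s.toList.length) :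
    pvCheckA s (k : Int) = pvGood3 (s.toList[k]'(by omega)) (s.toList[k+1]'(by omega)) (s.toList[k+2]'(by omega)) := by
  have e1 : ((k:Int))+1 = ((k+1:Nat):Int) := by push_cast; ring
  have e2 : ((k:Int))+2 = ((k+2:Nat):Int) := by push_cast; ring
  unfold pvCheckA
  rw [e1, e2]
  simp only [PySem.Str.pyGet?_eq, PySem.Chars.pyGet?_eq_listPyGet?, PySem.List.pyGet?_natCast]
  rw [List.getElem?_eq_getElem (by omega), List.getElem?_eq_getElem (by omega),
      List.getElem?_eq_getElem (by omega)]
  rfl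

theorem pv_A_iff (password : String) :
    detect_sequential_alpha password = true ↔ pvMid (PySem.Str.lower password).toList := by
  unfold detect_sequential_alpha pvMid
  simp only [List.any_eq_true]
  constructor
  · rintro ⟨i, hi, hci⟩
    rw [PySem.List.mem_pyRange_one] at hi
    obtain ⟨h0, hlt⟩ := hi
    rw [PySem.Str.len_eq] at hlt
    set l := (PySem.Str.lower password).toList with hl
    have hk : i = ((i.toNat : Nat) : Int) := (Int.toNat_of_nonneg h0).symm
    set k := i.toNat with hkdef
    have hlen : k + 2 < l.length := by omega
    rw [hk, pv_checkA_eq _ _ (by omega)] at hci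
    have hd : l.drop k = l[k]'(by omega) :: l[k+1]'(by omega) :: l[k+2]'(by omega) :: l.drop (k+3) := by
      rw [List.drop_eq_getElem_cons (by omega : k < l.length),
          List.drop_eq_getElem_cons (by omega : k+1 < l.length),
          List.drop_eq_getElem_cons (by omega : k+2 < l.length)]
    exact ⟨k, _, _, _, _, hd, hci⟩
  · rintro ⟨k, a, b, c, r, hd, hg⟩
    set l := (PySem.Str.lower password).toList with hl
    have hlen : k + 2 < l.length := by
      have := congrArg List.length hd
      simp [List.length_drop] at this
      omega
    have e1 : l[k]'(by omega) :: l.drop (k+1) = a :: b :: c :: r := by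
      rw [← List.drop_eq_getElem_cons]; exact hd
    injection e1 with ha hd1
    have e2 : l[k+1]'(by omega) :: l.drop (k+2) = b :: c :: r := by
      rw [← List.drop_eq_getElem_cons]; exact hd1
    injection e2 with hb hd2
    have e3 : l[k+2]'(by omega) :: l.drop (k+3) = c :: r := by
      rw [← List.drop_eq_getElem_cons]; exact hd2
    injection e3 with hc hd3
    refine ⟨(k : Int), ?_, ?_⟩
    · rw [PySem.List.mem_pyRange_one, PySem.Str.len_eq]
      constructor
      · positivity
      · rw [← hl]; omega
    · rw [pv_checkA_eq _ _ (by omega), ha, hb, hc]; exact hg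

theorem pv_B_iff (password : String) :
    detect_sequential_alpha_alt password = true ↔
    ∃ p ∈ pvPatterns, ∃ j : Nat, p.toList <+: (PySem.Str.lower password).toList.drop j := by
  unfold detect_sequential_alpha_alt
  simp only [List.any_eq_true]
  refine exists_congr fun p => and_congr_right fun _ => ?_
  rw [PySem.Str.isIn_eq, ← PySem.Chars.exists_prefix_drop_iff_isIn]

theorem pv_pats_eq : pvPatterns =
    ["abc","bcd","cde","def","efg","fgh","ghi","hij","ijk","jkl","klm","lmn","mno","nop","opq","pqr","qrs","rst","stu","tuv","uvw","vwx","wxy","xyz",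
     "zyx","yxw","xwv","wvu","vut","uts","tsr","srq","rqp","qpo","pon","onm","nml","mlk","lkj","kji","jih","ihg","hgf","gfe","fed","edc","dcb","cba"] := by
  decide

-- pvGood3 lifted to a 3-char list (proof helper)
def pvGood3L (m : List Char) : Bool :=
  match m with
  | [a, b, c] => pvGood3 a b c
  | _ => false

theorem pv_good3_of_mem (a b c : Char) (p : String) (hp : p ∈ pvPatterns) (he : p.toList = [a,b,c]) :
    pvGood3 a b c = true := by
  have h : pvGood3L p.toList = true := by
    rw [pv_pats_eq] at hp
    fin_cases hp <;> decide
  rw [he] at h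
  exact h

theorem pv_lower_bounds (x : Char) (hup : PySem.Chars.isupper x = false)
    (hal : PySem.Chars.isalpha x = true) : 97 ≤ x.toNat ∧ x.toNat ≤ 122 := by
  unfold PySem.Chars.isalpha at hal
  rw [Bool.or_eq_true, hup] at hal
  exact (pv_islower_iff x).mp (by simpa using hal)

theorem pv_mem_of_good3 (a b c : Char)
    (ha : PySem.Chars.isupper a = false) (_hb : PySem.Chars.isupper b = false) (hc : PySem.Chars.isupper c = false)
    (hg : pvGood3 a b c = true) : ∃ p ∈ pvPatterns, p.toList = [a,b,c] := by
  unfold pvGood3 at hg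
  split_ifs at hg with h1 h2 h3
  · -- ascending run
    rw [Bool.and_eq_true, Bool.and_eq_true] at h1
    obtain ⟨⟨hal, hbl⟩, hcl⟩ := h1
    rw [Bool.and_eq_true, beq_iff_eq, beq_iff_eq] at h2
    obtain ⟨hb1, hc1⟩ := h2
    obtain ⟨la1, la2⟩ := pv_lower_bounds a ha hal
    obtain ⟨lc1, lc2⟩ := pv_lower_bounds c hc hcl
    have hA : a = Char.ofNat a.toNat := (Char.ofNat_toNat a).symm
    have hB : b = Char.ofNat (a.toNat + 1) := by rw [← hb1]; exact (Char.ofNat_toNat b).symm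
    have hC : c = Char.ofNat (a.toNat + 2) := by
      rw [show a.toNat + 2 = c.toNat by omega]; exact (Char.ofNat_toNat c).symm
    rw [hA, hB, hC]
    have hb1' : 97 ≤ a.toNat := la1
    have hb2' : a.toNat ≤ 120 := by omega
    set n := a.toNat with hn
    clear_value n
    interval_cases n <;> decide
  · -- descending run
    rw [Bool.and_eq_true, Bool.and_eq_true] at h1
    obtain ⟨⟨hal, hbl⟩, hcl⟩ := h1
    rw [Bool.and_eq_true, beq_iff_eq, beq_iff_eq] at h3
    obtain ⟨hb1, hc1⟩ := h3
    obtain ⟨la1, la2⟩ := pv_lower_bounds a ha hal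
    obtain ⟨lc1, lc2⟩ := pv_lower_bounds c hc hcl
    have hA : a = Char.ofNat (c.toNat + 2) := by
      rw [show c.toNat + 2 = a.toNat by omega]; exact (Char.ofNat_toNat a).symm
    have hB : b = Char.ofNat (c.toNat + 1) := by
      rw [show c.toNat + 1 = b.toNat by omega]; exact (Char.ofNat_toNat b).symm
    have hC : c = Char.ofNat c.toNat := (Char.ofNat_toNat c).symm
    rw [hA, hB, hC]
    have hb1' : 97 ≤ c.toNat := lc1
    have hb2' : c.toNat ≤ 120 := by omega
    set n := c.toNat with hn
    clear_value n
    interval_cases n <;> decide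

-- ===== VERDICT (by name: the statement is the Claim_ definition above) =====
theorem detect_sequential_alpha_spec : Claim_equal_detect_sequential_alpha := by
  intro password _
  unfold Spec_detect_sequential_alpha
  rw [Bool.eq_iff_iff, pv_A_iff, pv_B_iff]
  constructor
  · rintro ⟨k, a, b, c, r, hd, hg⟩
    have hmem : ∀ x : Char, x ∈ ([a,b,c] : List Char) → PySem.Chars.isupper x = false := by
      intro x hx
      have hx' : x ∈ (PySem.Str.lower password).toList := by
        have : x ∈ (PySem.Str.lower password).toList.drop k := by
          rw [hd]; simp at hx; rcases hx with rfl | rfl | rfl <;> simp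
        exact List.mem_of_mem_drop this
      have : x ∈ PySem.Chars.lower password.toList := by simpa using hx'
      exact pv_mem_lower_not_upper _ _ this
    obtain ⟨p, hp, he⟩ := pv_mem_of_good3 a b c (hmem a (by simp)) (hmem b (by simp)) (hmem c (by simp)) hg
    exact ⟨p, hp, k, by rw [he, hd]; exact ⟨r, rfl⟩⟩
  · rintro ⟨p, hp, j, hpre⟩
    have h3 : ∃ a b c : Char, p.toList = [a,b,c] := by
      rw [pv_pats_eq] at hp
      fin_cases hp <;> exact ⟨_, _, _, rfl⟩
    obtain ⟨a, b, c, he⟩ := h3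
    rw [he] at hpre
    obtain ⟨r, hr⟩ := hpre
    exact ⟨j, a, b, c, r, by simpa using hr.symm, pv_good3_of_mem a b c p hp he⟩
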